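-- pv_equiv track=rewrite | github.com/Wajktor13/ads-lab | asd/labs/lab_8_graphs/zo1.py | delete_queue2
-- ===== SOURCE A (Python) =====
-- def delete_queue2(G):
--     V = len(G)
--     visited = [False for _ in range(V)]
--     del_q = []
--
--     for v in range(V):
--         if not visited[v]:
--             stack = [v]
--             while stack:
--                 u = stack.pop()
--                 if not visited[u]:
--                     del_q.append(u)
--                     visited[u] = True
--                     for s in G[u]:
--                         if not visited[s]:
--                             stack.append(s)
--
--
--     return del_q[::-1]
-- ===== SOURCE B (Python) =====
-- def delete_queue2(G):
--     # Lazy-frame iterative DFS: instead of eagerly pushing (filtered) copies of whole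
--     # neighbour lists onto one vertex stack, keep a stack of per-vertex frames of
--     # still-unprocessed neighbours and pop one neighbour at a time.
--     V = len(G)
--     visited = [False] * V
--     order = []
--     for v in range(V):
--         if not visited[v]:
--             visited[v] = True
--             order.append(v)
--             frames = [list(G[v])]
--             while frames:
--                 top = frames[-1]
--                 if not top:
--                     frames.pop()
--                     continue
--                 s = top.pop()
--                 if not visited[s]:
--                     visited[s] = True
--                     order.append(s)
--                     frames.append(list(G[s]))
--     return order[::-1]
-- ===== Notes on version B (the rewrite author's own statement) =====
-- stated objective: alternative
-- what changed: A runs DFS with one eager vertex stack (pushes a filtered copy of the whole neighbour list, may hold duplicates, re-checks visited at pop); B runs DFS with a stack of lazy per-vertex neighbour frames, popping one neighbour at a time, so no bulk filtered pushes and no duplicate vertex entries.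
import Mathlib
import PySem

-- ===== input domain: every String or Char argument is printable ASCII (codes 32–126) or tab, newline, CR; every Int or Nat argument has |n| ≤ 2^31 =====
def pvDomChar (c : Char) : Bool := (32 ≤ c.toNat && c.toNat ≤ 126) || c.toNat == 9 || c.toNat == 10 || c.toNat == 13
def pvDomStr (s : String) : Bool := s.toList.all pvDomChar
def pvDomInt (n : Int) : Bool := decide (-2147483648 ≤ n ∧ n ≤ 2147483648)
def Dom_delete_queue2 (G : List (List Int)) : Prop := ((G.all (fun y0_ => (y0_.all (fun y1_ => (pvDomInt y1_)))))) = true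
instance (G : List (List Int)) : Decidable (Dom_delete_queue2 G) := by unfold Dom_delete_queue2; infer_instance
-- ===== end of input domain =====

-- B is an alternative iterative DFS (lazy per-vertex neighbour frames instead of one eager,
-- push-time-filtered vertex stack); equal traversal order is proved on all graphs whose
-- neighbour entries are in-range Python indices (Pre_ excludes only the IndexError cases).

-- ===== PORT A =====
-- termination helper for the while-loops: marking an unvisited vertex lowers the count of False entries
theorem pv_count_set_lt (l : List Bool) (k : Nat) (hk : k < l.length) (hv : l[k] = false) :
    (l.set k true).count false < l.count false := by
  induction l generalizing k with
  | nil => simp at hk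
  | cons x xs ih =>
    cases k with
    | zero => simp at hv; subst hv; simp
    | succ k =>
      simp at hk hv
      simp [List.set_cons_succ, List.count_cons]
      have := ih k hk hv
      omega

theorem pv_set_count_lt (l : List Bool) (u : Int)
    (h : PySem.List.pyGet? l u = some false) :
    (PySem.List.pySetD l u true).count false < l.count false := by
  unfold PySem.List.pyGet? at h
  cases e : PySem.List.pyIdx? l.length u with
  | none => rw [e] at h; simp at h
  | some k =>
    rw [e] at h
    simp at h
    have hk : k < l.length := by
      by_contra hh
      rw [List.getElem?_eq_none (by omega)] at h
      simp at h
    rw [List.getElem?_eq_getElem hk] at h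
    simp at h
    simp [PySem.List.pySetD, PySem.List.pySet?, e]
    exact pv_count_set_lt l k hk h

-- A's inner `while stack:` loop; the Lean list `stack` has Python's stack TOP as its HEAD
-- (Python pops/appends at the end).  `none` from an index = IndexError (excluded by Pre_).
def pvLoopA (G : List (List Int)) (visited : List Bool) (stack : List Int) (acc : List Int) :
    List Bool × List Int :=
  match stack with
  | [] => (visited, acc)
  | u :: rest =>
    match h : PySem.List.pyGet? visited u with
    | none => (visited, acc)                -- IndexError: unreachable under Pre_
    | some true => pvLoopA G visited rest acc
    | some false =>
      let visited' := PySem.List.pySetD visited u true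
      let ns := (PySem.List.pyGet? G u).getD []
      pvLoopA G visited'
        ((ns.filter (fun s => PySem.List.pyGet? visited' s == some false)).reverse ++ rest)
        (acc ++ [u])
termination_by (visited.count false, stack.length)
decreasing_by
  · exact Prod.Lex.right _ (Nat.lt_succ_self _)
  · exact Prod.Lex.left _ _ (pv_set_count_lt visited u h)

def delete_queue2 (G : List (List Int)) : List Int :=
  let V := G.length
  let init : List Bool := (List.range V).map (fun _ => false)   -- [False for _ in range(V)]
  let st := (PySem.List.pyRange 0 (V : Int) 1).foldl
    (fun (st : List Bool × List Int) v =>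
      match PySem.List.pyGet? st.1 v with
      | some false => pvLoopA G st.1 [v] st.2
      | _ => st) (init, [])
  (PySem.List.slice? st.2 none none (-1)).getD []               -- del_q[::-1]

-- ===== PORT B =====
-- B's `while frames:` loop; each frame holds the not-yet-popped neighbours. Python pops from
-- the END of a frame, so a frame is stored REVERSED here and popped at its head (same
-- elements, same pop order); the frames stack itself also has its top as the head.
def pvLoopB (G : List (List Int)) (visited : List Bool) (frames : List (List Int)) (acc : List Int) :
    List Bool × List Int :=
  match frames with
  | [] => (visited, acc)
  | [] :: F => pvLoopB G visited F acc      -- `if not top: frames.pop()`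
  | (s :: f) :: F =>                        -- `s = top.pop()`
    match h : PySem.List.pyGet? visited s with
    | none => (visited, acc)                -- IndexError: unreachable under Pre_
    | some true => pvLoopB G visited (f :: F) acc
    | some false =>
      let visited' := PySem.List.pySetD visited s true
      pvLoopB G visited'
        ((((PySem.List.pyGet? G s).getD []).reverse) :: f :: F)
        (acc ++ [s])
termination_by (visited.count false, (frames.map (fun f => f.length + 1)).sum)
decreasing_by
  all_goals first
  | exact Prod.Lex.left _ _ (pv_set_count_lt visited s h)
  | exact Prod.Lex.right _ (by simp [List.sum_cons])

def delete_queue2_alt (G : List (List Int)) : List Int :=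
  let V := G.length
  let st := (PySem.List.pyRange 0 (V : Int) 1).foldl
    (fun (st : List Bool × List Int) v =>
      if PySem.List.pyGet? st.1 v == some false then
        let visited' := PySem.List.pySetD st.1 v true
        pvLoopB G visited' [((PySem.List.pyGet? G v).getD []).reverse] (st.2 ++ [v])
      else st)
    (List.replicate V false, [])                                -- [False] * V
  (PySem.List.slice? st.2 none none (-1)).getD []               -- order[::-1]

-- ===== PRECONDITION & SPEC =====
-- Pre_ excludes exactly the graphs with an out-of-range neighbour entry (s ≥ len(G) or
-- s < -len(G)), on which A raises IndexError at `visited[s]`.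
def Pre_delete_queue2 (G : List (List Int)) : Prop :=
  ∀ row ∈ G, ∀ s ∈ row, -(G.length : Int) ≤ s ∧ s < (G.length : Int)
instance (G : List (List Int)) : Decidable (Pre_delete_queue2 G) := by
  unfold Pre_delete_queue2; infer_instance

def pvWitness_delete_queue2 : List (List Int) := [[1, 0], [2], []]

def Spec_delete_queue2 (G : List (List Int)) (out : List Int) : Prop := out = delete_queue2_alt G
instance (G : List (List Int)) (out : List Int) : Decidable (Spec_delete_queue2 G out) := by
  unfold Spec_delete_queue2; infer_instance

-- ===== CLAIM (what is proved, stated in full; the proofs are below) =====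
def Claim_equal_delete_queue2 : Prop :=
  ∀ (G : List (List Int)), Dom_delete_queue2 G → Pre_delete_queue2 G →
    Spec_delete_queue2 G (delete_queue2 G)

-- ===== LEMMAS AND PROOFS =====

-- ---- step lemmas for the two loops ----
theorem pvLoopA_nil (G : List (List Int)) (vis : List Bool) (acc : List Int) :
    pvLoopA G vis [] acc = (vis, acc) := by
  rw [pvLoopA.eq_def]

theorem pvLoopA_cons_true (G : List (List Int)) (vis : List Bool) (u : Int) (rest acc : List Int)
    (h : PySem.List.pyGet? vis u = some true) :
    pvLoopA G vis (u :: rest) acc = pvLoopA G vis rest acc := by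
  rw [pvLoopA.eq_def]; (repeat' split) <;> simp_all

theorem pvLoopA_cons_false (G : List (List Int)) (vis : List Bool) (u : Int) (rest acc : List Int)
    (h : PySem.List.pyGet? vis u = some false) :
    pvLoopA G vis (u :: rest) acc =
      pvLoopA G (PySem.List.pySetD vis u true)
        ((((PySem.List.pyGet? G u).getD []).filter
            (fun s => PySem.List.pyGet? (PySem.List.pySetD vis u true) s == some false)).reverse ++ rest)
        (acc ++ [u]) := by
  rw [pvLoopA.eq_def]; (repeat' split) <;> simp_all

theorem pvLoopB_nil (G : List (List Int)) (vis : List Bool) (acc : List Int) :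
    pvLoopB G vis [] acc = (vis, acc) := by
  rw [pvLoopB.eq_def]

theorem pvLoopB_nilframe (G : List (List Int)) (vis : List Bool) (F : List (List Int)) (acc : List Int) :
    pvLoopB G vis ([] :: F) acc = pvLoopB G vis F acc := by
  rw [pvLoopB.eq_def]

theorem pvLoopB_cons_true (G : List (List Int)) (vis : List Bool) (s : Int) (f : List Int)
    (F : List (List Int)) (acc : List Int) (h : PySem.List.pyGet? vis s = some true) :
    pvLoopB G vis ((s :: f) :: F) acc = pvLoopB G vis (f :: F) acc := by
  rw [pvLoopB.eq_def]; (repeat' split) <;> simp_all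

theorem pvLoopB_cons_false (G : List (List Int)) (vis : List Bool) (s : Int) (f : List Int)
    (F : List (List Int)) (acc : List Int) (h : PySem.List.pyGet? vis s = some false) :
    pvLoopB G vis ((s :: f) :: F) acc =
      pvLoopB G (PySem.List.pySetD vis s true)
        ((((PySem.List.pyGet? G s).getD []).reverse) :: f :: F) (acc ++ [s]) := by
  rw [pvLoopB.eq_def]; (repeat' split) <;> simp_all

-- ---- order on visited lists ----
def pvLe (a b : List Bool) : Prop := List.Forall₂ (fun x y => x = true → y = true) a b

theorem pvLe_refl (a : List Bool) : pvLe a a := by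
  induction a with
  | nil => exact List.Forall₂.nil
  | cons x xs ih => exact List.Forall₂.cons (fun h => h) ih

theorem pvLe_trans {a b c : List Bool} (h1 : pvLe a b) (h2 : pvLe b c) : pvLe a c := by
  induction h1 generalizing c with
  | nil => exact h2
  | cons hxy _ ih =>
    cases h2 with
    | cons hyz h2' => exact List.Forall₂.cons (fun h => hyz (hxy h)) (ih h2')

theorem pvLe_length {a b : List Bool} (h : pvLe a b) : a.length = b.length :=
  List.Forall₂.length_eq h

theorem pvLe_set (a : List Bool) (j : Nat) : pvLe a (a.set j true) := by
  induction a generalizing j with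
  | nil => exact List.Forall₂.nil
  | cons x xs ih =>
    cases j with
    | zero => exact List.Forall₂.cons (fun _ => rfl) (pvLe_refl xs)
    | succ j => exact List.Forall₂.cons (fun h => h) (ih j)

theorem pvLe_getD {a b : List Bool} (h : pvLe a b) (j : Nat)
    (ha : a.getD j false = true) : b.getD j false = true := by
  induction h generalizing j with
  | nil => simp at ha
  | cons hxy _ ih =>
    cases j with
    | zero => exact hxy ha
    | succ j => exact ih j ha

theorem pvLe_count {a b : List Bool} (h : pvLe a b) : b.count false ≤ a.count false := by
  induction h with
  | nil => simp
  | cons hxy h' ih =>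
    rename_i x y _ _
    cases x with
    | false => cases y <;> simp [List.count_cons] <;> omega
    | true => rw [hxy rfl]; cases y <;> simp [List.count_cons] <;> omega

-- ---- index access under validity (covers Python's negative in-range indices too) ----
theorem pv_idx (n : Nat) (s : Int) (h0 : -(n : Int) ≤ s) (h1 : s < (n : Int)) :
    ∃ k, PySem.List.pyIdx? n s = some k ∧ k < n := by
  unfold PySem.List.pyIdx?
  by_cases hpos : 0 ≤ s
  · rw [if_pos hpos, if_pos h1]
    exact ⟨s.toNat, rfl, by omega⟩
  · rw [if_neg hpos, if_pos h0]
    exact ⟨n - (-s).toNat, rfl, by omega⟩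

theorem pv_get_idx (vis : List Bool) (s : Int) (k : Nat)
    (e : PySem.List.pyIdx? vis.length s = some k) (hk : k < vis.length) :
    PySem.List.pyGet? vis s = some (vis.getD k false) := by
  unfold PySem.List.pyGet?
  rw [e, Option.bind_some, List.getElem?_eq_getElem hk, List.getD_eq_getElem vis false hk]

-- ---- validity of neighbour lists ----
def pvValid (G : List (List Int)) (l : List Int) : Prop :=
  ∀ s ∈ l, -(G.length : Int) ≤ s ∧ s < (G.length : Int)

theorem pv_row_valid (G : List (List Int)) (hG : Pre_delete_queue2 G) (u : Int) :
    pvValid G ((PySem.List.pyGet? G u).getD []) := by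
  cases e : PySem.List.pyGet? G u with
  | none => intro s hs; simp at hs
  | some row =>
    intro s hs; simp at hs
    have hrow : row ∈ G := PySem.List.mem_of_pyGet?_eq_some _ e
    exact hG row hrow s hs

theorem pvLe_pySetD (vis : List Bool) (u : Int) :
    pvLe vis (PySem.List.pySetD vis u true) := by
  unfold PySem.List.pySetD PySem.List.pySet?
  cases e : PySem.List.pyIdx? vis.length u <;> simp [e, pvLe_refl, pvLe_set]

theorem pvValid_of_sublist {G : List (List Int)} {l l' : List Int}
    (h : ∀ s ∈ l', s ∈ l) (hv : pvValid G l) : pvValid G l' :=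
  fun s hs => hv s (h s hs)

-- ---- monotonicity of the two loops ----
theorem pvLoopB_mono (G : List (List Int)) (vis : List Bool) (F : List (List Int)) (acc : List Int) :
    pvLe vis (pvLoopB G vis F acc).1 := by
  fun_induction pvLoopB G vis F acc <;> first
  | exact pvLe_refl _
  | assumption
  | (rename_i ih; exact pvLe_trans (pvLe_pySetD _ _) ih)

theorem pvLoopB_len (G : List (List Int)) (vis : List Bool) (F : List (List Int)) (acc : List Int) :
    (pvLoopB G vis F acc).1.length = vis.length :=
  (pvLe_length (pvLoopB_mono G vis F acc)).symm

theorem pvLoopB_count (G : List (List Int)) (vis : List Bool) (F : List (List Int)) (acc : List Int) :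
    (pvLoopB G vis F acc).1.count false ≤ vis.count false :=
  pvLe_count (pvLoopB_mono G vis F acc)

-- ---- compositionality ----
theorem pvLoopB_cons_split (G : List (List Int)) (hG : Pre_delete_queue2 G) :
    ∀ (n : Nat) (vis : List Bool) (f : List Int) (F : List (List Int)) (acc : List Int),
      vis.count false ≤ n → vis.length = G.length → pvValid G f →
      pvLoopB G vis (f :: F) acc =
        pvLoopB G (pvLoopB G vis [f] acc).1 F (pvLoopB G vis [f] acc).2 := by
  intro n
  induction n using Nat.strong_induction_on with
  | _ n IH =>
  intro vis f F acc hc hlen hval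
  revert hval
  induction f with
  | nil =>
    intro _
    rw [pvLoopB_nilframe, pvLoopB_nilframe, pvLoopB_nil]
  | cons s f' ihf =>
    intro hval
    have hs := hval s (List.mem_cons_self)
    obtain ⟨k, e, hk⟩ := pv_idx vis.length s (by rw [hlen]; exact hs.1) (by rw [hlen]; exact hs.2)
    have hget : PySem.List.pyGet? vis s = some (vis.getD k false) := pv_get_idx vis s k e hk
    have hvf' : pvValid G f' := pvValid_of_sublist (fun x hx => List.mem_cons_of_mem _ hx) hval
    cases hb : vis.getD k false with
    | true =>
      have hgt : PySem.List.pyGet? vis s = some true := by rw [hget, hb]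
      rw [pvLoopB_cons_true _ _ _ _ _ _ hgt, pvLoopB_cons_true _ _ _ _ _ _ hgt]
      exact ihf hvf'
    | false =>
      have hgf : PySem.List.pyGet? vis s = some false := by rw [hget, hb]
      rw [pvLoopB_cons_false _ _ _ _ _ _ hgf, pvLoopB_cons_false _ _ _ _ _ _ hgf]
      have hc' : (PySem.List.pySetD vis s true).count false < n :=
        lt_of_lt_of_le (pv_set_count_lt vis s hgf) hc
      have hlen' : (PySem.List.pySetD vis s true).length = G.length := by
        rw [PySem.List.length_pySetD]; exact hlen
      have hvns : pvValid G (((PySem.List.pyGet? G s).getD []).reverse) :=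
        pvValid_of_sublist (by intro x hx; simpa using hx) (pv_row_valid G hG s)
      rw [IH _ hc' (PySem.List.pySetD vis s true) (((PySem.List.pyGet? G s).getD []).reverse)
            (f' :: F) (acc ++ [s]) le_rfl hlen' hvns]
      have hlenW : (pvLoopB G (PySem.List.pySetD vis s true)
          [((PySem.List.pyGet? G s).getD []).reverse] (acc ++ [s])).1.length = G.length := by
        rw [pvLoopB_len]; exact hlen'
      have hcW : (pvLoopB G (PySem.List.pySetD vis s true)
          [((PySem.List.pyGet? G s).getD []).reverse] (acc ++ [s])).1.count false < n :=
        lt_of_le_of_lt (pvLoopB_count _ _ _ _) hc'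
      rw [IH _ hcW _ f' F _ le_rfl hlenW hvf']
      rw [IH _ hc' (PySem.List.pySetD vis s true) (((PySem.List.pyGet? G s).getD []).reverse)
            [f'] (acc ++ [s]) le_rfl hlen' hvns]

theorem pvLoopA_append (G : List (List Int)) (hG : Pre_delete_queue2 G) :
    ∀ (n : Nat) (vis : List Bool) (l1 l2 acc : List Int),
      vis.count false ≤ n → vis.length = G.length → pvValid G l1 →
      pvLoopA G vis (l1 ++ l2) acc =
        pvLoopA G (pvLoopA G vis l1 acc).1 l2 (pvLoopA G vis l1 acc).2 := by
  intro n
  induction n using Nat.strong_induction_on with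
  | _ n IH =>
  intro vis l1 l2 acc hc hlen hval
  revert hval
  induction l1 with
  | nil =>
    intro _
    rw [List.nil_append, pvLoopA_nil]
  | cons u rest ihr =>
    intro hval
    have hu := hval u (List.mem_cons_self)
    obtain ⟨k, e, hk⟩ := pv_idx vis.length u (by rw [hlen]; exact hu.1) (by rw [hlen]; exact hu.2)
    have hget : PySem.List.pyGet? vis u = some (vis.getD k false) := pv_get_idx vis u k e hk
    have hvr : pvValid G rest := pvValid_of_sublist (fun x hx => List.mem_cons_of_mem _ hx) hval
    cases hb : vis.getD k false with
    | true =>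
      have hgt : PySem.List.pyGet? vis u = some true := by rw [hget, hb]
      rw [List.cons_append, pvLoopA_cons_true _ _ _ _ _ hgt, pvLoopA_cons_true _ _ _ _ _ hgt]
      exact ihr hvr
    | false =>
      have hgf : PySem.List.pyGet? vis u = some false := by rw [hget, hb]
      rw [List.cons_append, pvLoopA_cons_false _ _ _ _ _ hgf, pvLoopA_cons_false _ _ _ _ _ hgf,
        ← List.append_assoc]
      have hc' : (PySem.List.pySetD vis u true).count false < n :=
        lt_of_lt_of_le (pv_set_count_lt vis u hgf) hc
      have hlen' : (PySem.List.pySetD vis u true).length = G.length := by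
        rw [PySem.List.length_pySetD]; exact hlen
      have hvp : pvValid G
          ((((PySem.List.pyGet? G u).getD []).filter
              (fun s => PySem.List.pyGet? (PySem.List.pySetD vis u true) s == some false)).reverse
            ++ rest) := by
        refine pvValid_of_sublist ?_ ?_ (l := (((PySem.List.pyGet? G u).getD [])) ++ rest)
        · intro x hx
          simp only [List.mem_append, List.mem_reverse, List.mem_filter] at hx ⊢
          rcases hx with h | h
          · exact Or.inl h.1
          · exact Or.inr h
        · intro x hx
          rcases List.mem_append.mp hx with h | h
          · exact pv_row_valid G hG u x h
          · exact hvr x h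
      exact IH _ hc' (PySem.List.pySetD vis u true) _ l2 (acc ++ [u]) le_rfl hlen' hvp

-- ---- the heart: A's filtered-push stack run of one list = B's frame run of that list ----
theorem pv_main (G : List (List Int)) (hG : Pre_delete_queue2 G) :
    ∀ (n : Nat) (vis0 vis : List Bool) (t acc : List Int),
      vis.count false ≤ n → vis.length = G.length → pvValid G t → pvLe vis0 vis →
      pvLoopA G vis (t.filter (fun s => PySem.List.pyGet? vis0 s == some false)) acc =
        pvLoopB G vis [t] acc := by
  intro n
  induction n using Nat.strong_induction_on with
  | _ n IH =>
  intro vis0 vis t acc hc hlen hvalt hle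
  revert hvalt
  induction t with
  | nil =>
    intro _
    rw [List.filter_nil, pvLoopA_nil, pvLoopB_nilframe, pvLoopB_nil]
  | cons s t' iht =>
    intro hvalt
    have hs := hvalt s (List.mem_cons_self)
    have hlen0 : vis0.length = vis.length := pvLe_length hle
    obtain ⟨k, e, hk⟩ := pv_idx vis.length s (by rw [hlen]; exact hs.1) (by rw [hlen]; exact hs.2)
    have e0 : PySem.List.pyIdx? vis0.length s = some k := by rw [hlen0]; exact e
    have hget0 : PySem.List.pyGet? vis0 s = some (vis0.getD k false) :=
      pv_get_idx vis0 s k e0 (by rw [hlen0]; exact hk)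
    have hget : PySem.List.pyGet? vis s = some (vis.getD k false) := pv_get_idx vis s k e hk
    have hvt' : pvValid G t' := pvValid_of_sublist (fun x hx => List.mem_cons_of_mem _ hx) hvalt
    rw [List.filter_cons]
    cases h0 : vis0.getD k false with
    | true =>
      have hps : ((PySem.List.pyGet? vis0 s == some false) = false) := by simp [hget0, ← List.getD_eq_getElem?_getD, h0]
      rw [hps]
      simp only [Bool.false_eq_true, if_false]
      have hvt : vis.getD k false = true := pvLe_getD hle k h0
      have hgt : PySem.List.pyGet? vis s = some true := by rw [hget, hvt]
      rw [pvLoopB_cons_true _ _ _ _ _ _ hgt]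
      exact iht hvt'
    | false =>
      have hps : ((PySem.List.pyGet? vis0 s == some false) = true) := by simp [hget0, ← List.getD_eq_getElem?_getD, h0]
      rw [hps]
      simp only [if_true]
      cases hb : vis.getD k false with
      | true =>
        have hgt : PySem.List.pyGet? vis s = some true := by rw [hget, hb]
        rw [pvLoopA_cons_true _ _ _ _ _ hgt, pvLoopB_cons_true _ _ _ _ _ _ hgt]
        exact iht hvt'
      | false =>
        have hgf : PySem.List.pyGet? vis s = some false := by rw [hget, hb]
        rw [pvLoopA_cons_false _ _ _ _ _ hgf, pvLoopB_cons_false _ _ _ _ _ _ hgf]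
        have hc' : (PySem.List.pySetD vis s true).count false < n :=
          lt_of_lt_of_le (pv_set_count_lt vis s hgf) hc
        have hlen' : (PySem.List.pySetD vis s true).length = G.length := by
          rw [PySem.List.length_pySetD]; exact hlen
        have hvns : pvValid G (((PySem.List.pyGet? G s).getD []).reverse) :=
          pvValid_of_sublist (by intro x hx; simpa using hx) (pv_row_valid G hG s)
        have hvpush : pvValid G
            (((PySem.List.pyGet? G s).getD []).reverse.filter
              (fun x => PySem.List.pyGet? (PySem.List.pySetD vis s true) x == some false)) :=
          pvValid_of_sublist (by intro x hx; exact (List.mem_filter.mp hx).1) hvns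
        rw [← List.filter_reverse]
        rw [pvLoopA_append G hG ((PySem.List.pySetD vis s true).count false)
              (PySem.List.pySetD vis s true)
              (((PySem.List.pyGet? G s).getD []).reverse.filter
                (fun x => PySem.List.pyGet? (PySem.List.pySetD vis s true) x == some false))
              (List.filter (fun x => PySem.List.pyGet? vis0 x == some false) t')
              (acc ++ [s]) le_rfl hlen' hvpush]
        rw [IH _ hc' (PySem.List.pySetD vis s true) (PySem.List.pySetD vis s true)
              (((PySem.List.pyGet? G s).getD []).reverse) (acc ++ [s]) le_rfl hlen' hvns
              (pvLe_refl _)]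
        rw [pvLoopB_cons_split G hG ((PySem.List.pySetD vis s true).count false)
              (PySem.List.pySetD vis s true) (((PySem.List.pyGet? G s).getD []).reverse)
              [t'] (acc ++ [s]) le_rfl hlen' hvns]
        have hlenW : (pvLoopB G (PySem.List.pySetD vis s true)
            [((PySem.List.pyGet? G s).getD []).reverse] (acc ++ [s])).1.length = G.length := by
          rw [pvLoopB_len]; exact hlen'
        have hcW : (pvLoopB G (PySem.List.pySetD vis s true)
            [((PySem.List.pyGet? G s).getD []).reverse] (acc ++ [s])).1.count false < n :=
          lt_of_le_of_lt (pvLoopB_count _ _ _ _) hc'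
        have hleW : pvLe vis0 (pvLoopB G (PySem.List.pySetD vis s true)
            [((PySem.List.pyGet? G s).getD []).reverse] (acc ++ [s])).1 :=
          pvLe_trans hle (pvLe_trans (pvLe_pySetD vis s) (pvLoopB_mono _ _ _ _))
        exact IH _ hcW vis0 _ t' _ le_rfl hlenW hvt' hleW

-- ---- top-level folds agree ----
theorem pv_fold (G : List (List Int)) (hG : Pre_delete_queue2 G) :
    ∀ (l : List Int) (st : List Bool × List Int),
      (∀ v ∈ l, 0 ≤ v ∧ v < (G.length : Int)) → st.1.length = G.length →
      l.foldl (fun (st : List Bool × List Int) v =>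
          match PySem.List.pyGet? st.1 v with
          | some false => pvLoopA G st.1 [v] st.2
          | _ => st) st =
      l.foldl (fun (st : List Bool × List Int) v =>
          if PySem.List.pyGet? st.1 v == some false then
            pvLoopB G (PySem.List.pySetD st.1 v true)
              [((PySem.List.pyGet? G v).getD []).reverse] (st.2 ++ [v])
          else st) st := by
  intro l
  induction l with
  | nil => intro st _ _; rfl
  | cons v l' ih =>
    intro st hvl hlen
    have hv := hvl v (List.mem_cons_self)
    have hvl' : ∀ x ∈ l', 0 ≤ x ∧ x < (G.length : Int) := fun x hx => hvl x (List.mem_cons_of_mem _ hx)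
    obtain ⟨k, e, hk⟩ := pv_idx st.1.length v (by rw [hlen]; exact le_trans (by omega) hv.1)
      (by rw [hlen]; exact hv.2)
    have hget : PySem.List.pyGet? st.1 v = some (st.1.getD k false) := pv_get_idx st.1 v k e hk
    simp only [List.foldl_cons]
    cases hb : st.1.getD k false with
    | true =>
      have hgt : PySem.List.pyGet? st.1 v = some true := by rw [hget, hb]
      have hcond : (PySem.List.pyGet? st.1 v == some false) = false := by simp [hgt]
      simp only [hgt, hcond, Bool.false_eq_true, if_false]
      exact ih st hvl' hlen
    | false =>
      have hgf : PySem.List.pyGet? st.1 v = some false := by rw [hget, hb]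
      have hcond : (PySem.List.pyGet? st.1 v == some false) = true := by simp [hgf]
      simp only [hgf, hcond, if_true]
      have hlen' : (PySem.List.pySetD st.1 v true).length = G.length := by
        rw [PySem.List.length_pySetD]; exact hlen
      have hvns : pvValid G (((PySem.List.pyGet? G v).getD []).reverse) :=
        pvValid_of_sublist (by intro x hx; simpa using hx) (pv_row_valid G hG v)
      have hstep : pvLoopA G st.1 [v] st.2 =
          pvLoopB G (PySem.List.pySetD st.1 v true)
            [((PySem.List.pyGet? G v).getD []).reverse] (st.2 ++ [v]) := by
        have hfilter : List.filter (fun x => PySem.List.pyGet? st.1 x == some false) [v] = [v] := by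
          simp [hgf]
        have hmain := pv_main G hG (st.1.count false) st.1 st.1 [v] st.2 le_rfl hlen
          (by intro x hx; simp at hx; subst hx; exact ⟨by have := hv.1; omega, hv.2⟩) (pvLe_refl _)
        rw [hfilter] at hmain
        rw [hmain]
        rw [pvLoopB_cons_false _ _ _ _ _ _ hgf]
        rw [pvLoopB_cons_split G hG ((PySem.List.pySetD st.1 v true).count false)
              (PySem.List.pySetD st.1 v true) (((PySem.List.pyGet? G v).getD []).reverse)
              [[]] (st.2 ++ [v]) le_rfl hlen' hvns]
        rw [pvLoopB_nilframe, pvLoopB_nil]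
      rw [hstep]
      exact ih _ hvl' (by rw [pvLoopB_len]; exact hlen')

-- ===== VERDICT (by name: the statement is the Claim_ definition above) =====
theorem delete_queue2_spec : Claim_equal_delete_queue2 := by
  intro G _ hPre
  unfold Spec_delete_queue2 delete_queue2 delete_queue2_alt
  have hinit : (List.range G.length).map (fun _ => false) = List.replicate G.length false := by
    simp [List.map_const']
  have := pv_fold G hPre (PySem.List.pyRange 0 (G.length : Int) 1)
      (List.replicate G.length false, [])
      (fun v hv => by
        rw [PySem.List.mem_pyRange_one] at hv
        exact ⟨hv.1, hv.2⟩)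
      (by simp)
  simp only [hinit, this]
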